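-- pv_equiv track=rewrite | github.com/PolyArch/gem-forge-script | BenchmarkDrivers/Rodinia.py | get_name_prefix
-- ===== SOURCE A (Python) =====
-- def get_name_prefix(name):
--     prefixes = [
--         'hotspot',
--         'hotspot3D',
--         'pathfinder',
--         'srad_v2',
--         'srad_v3',
--     ]
--     for prefix in prefixes:
--         if name.startswith(f'{prefix}-'):
--             return prefix
--     return name
-- ===== SOURCE B (Python) =====
-- _PREFIXES = {'hotspot', 'hotspot3D', 'pathfinder', 'srad_v2', 'srad_v3'}
--
-- def get_name_prefix(name):
--     i = name.find('-')
--     p = name[:i]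
--     if i != -1 and p in _PREFIXES:
--         return p
--     return name
-- ===== Notes on version B (the rewrite author's own statement) =====
-- stated objective: simpler
-- what changed: Instead of scanning the name with a startswith test per known benchmark prefix, B locates the first dash once, takes the text before it, and decides with a single membership test against the prefix set.
import Mathlib
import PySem

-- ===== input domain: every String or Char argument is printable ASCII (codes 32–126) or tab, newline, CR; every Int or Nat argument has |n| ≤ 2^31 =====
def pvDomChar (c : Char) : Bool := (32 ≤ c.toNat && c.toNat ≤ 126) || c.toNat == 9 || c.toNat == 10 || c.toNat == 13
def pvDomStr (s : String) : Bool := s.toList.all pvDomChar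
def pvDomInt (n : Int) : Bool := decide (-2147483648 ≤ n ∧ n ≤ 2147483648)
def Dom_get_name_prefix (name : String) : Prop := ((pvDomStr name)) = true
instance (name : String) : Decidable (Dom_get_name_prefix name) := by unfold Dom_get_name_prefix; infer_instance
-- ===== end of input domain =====

-- B replaces A's per-prefix startswith scans by locating the first dash once and
-- doing a single membership test of the text before it (objective: simpler).

-- ===== PORT A =====
-- A's literal prefix list, in A's order
def pvPrefixesA : List String := ["hotspot", "hotspot3D", "pathfinder", "srad_v2", "srad_v3"]

-- A's 'for prefix in prefixes: if name.startswith(f"{prefix}-"): return prefix'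
def pvLoopA (name : String) : List String → String
  | [] => name
  | p :: rest => if PySem.Str.startswith name (p ++ "-") then p else pvLoopA name rest

def get_name_prefix (name : String) : String := pvLoopA name pvPrefixesA

-- ===== PORT B =====
-- B's literal set {'hotspot', 'hotspot3D', 'pathfinder', 'srad_v2', 'srad_v3'}
def pvPrefixSetB : PySem.Set String :=
  PySem.Set.ofList ["hotspot", "hotspot3D", "pathfinder", "srad_v2", "srad_v3"]

-- i = name.find('-'); p = name[:i]; return p if i != -1 and p in SET else name
def get_name_prefix_alt (name : String) : String :=
  let i := PySem.Str.find name "-"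
  let p := PySem.Str.slice name none (some i)
  if i != -1 && pvPrefixSetB.contains p then p else name

-- ===== PRECONDITION & SPEC =====
def Spec_get_name_prefix (name : String) (out : String) : Prop := out = get_name_prefix_alt name
instance (name : String) (out : String) : Decidable (Spec_get_name_prefix name out) := by unfold Spec_get_name_prefix; infer_instance

-- ===== CLAIM (what is proved, stated in full; the proofs are below) =====
def Claim_equal_get_name_prefix : Prop := ∀ (name : String), Dom_get_name_prefix name → Spec_get_name_prefix name (get_name_prefix name)

-- ===== LEMMAS AND PROOFS =====

-- if name contains no '-', every startswith(P ++ "-") test of A fails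
theorem pv_startswith_false (name P : String) (h : ¬ ['-'] <:+: name.toList) :
    PySem.Str.startswith name (P ++ "-") = false := by
  rw [PySem.Str.startswith_eq]
  cases hsw : PySem.Chars.startswith name.toList (P ++ "-").toList with
  | false => rfl
  | true =>
    exfalso
    have hp : (P ++ "-").toList <+: name.toList := (PySem.Chars.startswith_iff _ _).mp hsw
    have hinf : ['-'] <:+: (P ++ "-").toList := by
      refine ⟨P.toList, [], ?_⟩
      simp
    exact h (hinf.trans hp.isInfix)

-- the key characterisation: with the first '-' of l at position j and no '-' in P,
-- 'l startswith P ++ "-"' is exactly 'l.take j = P'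
theorem pv_key (l P : List Char) (hP : '-' ∉ P) (j : Nat)
    (hpre : ['-'] <+: l.drop j) (hmin : ∀ i, i < j → ¬ ['-'] <+: l.drop i) :
    ((P ++ ['-']) <+: l ↔ l.take j = P) := by
  constructor
  · rintro ⟨t, ht⟩
    subst ht
    have hm : ['-'] <+: (P ++ ['-'] ++ t).drop P.length := by
      have : (P ++ ['-'] ++ t).drop P.length = ['-'] ++ t := by
        rw [List.append_assoc, List.drop_left]
      rw [this]
      exact ⟨t, rfl⟩
    have hjm : j ≤ P.length := by
      by_contra hlt
      exact hmin P.length (by omega) hm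
    rcases Nat.lt_or_ge j P.length with hlt | hge
    · exfalso
      rcases hpre with ⟨u, hu⟩
      have hget : (P ++ ['-'] ++ t)[j]? = some '-' := by
        have h1 : (P ++ ['-'] ++ t).drop j = '-' :: u := hu.symm
        have h2 : (P ++ ['-'] ++ t)[j]? = ((P ++ ['-'] ++ t).drop j).head? := by
          rw [List.head?_drop]
        rw [h2, h1]; rfl
      have hgetP : (P ++ ['-'] ++ t)[j]? = P[j]? := by
        rw [List.append_assoc, List.getElem?_append_left hlt]
      rw [hgetP] at hget
      exact hP (List.mem_of_getElem? hget)
    · have hj : j = P.length := le_antisymm hjm hge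
      subst hj
      rw [List.append_assoc, List.take_left]
  · intro htake
    rcases hpre with ⟨u, hu⟩
    refine ⟨u, ?_⟩
    have : l = l.take j ++ l.drop j := (List.take_append_drop j l).symm
    rw [this, htake, ← hu]
    simp

theorem pv_main (name : String) : get_name_prefix name = get_name_prefix_alt name := by
  have hdash : ("-" : String).toList = ['-'] := rfl
  by_cases hf : PySem.Chars.find name.toList ['-'] = -1
  · -- no '-' in name: both sides return name
    have hno : ¬ ['-'] <:+: name.toList := (PySem.Chars.find_eq_neg_one_iff _ _).mp hf
    have hsw0 : ∀ P : String, PySem.Str.startswith name (P ++ "-") = false := fun P =>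
      pv_startswith_false name P hno
    have hA : get_name_prefix name = name := by
      simp only [get_name_prefix, pvPrefixesA, pvLoopA, hsw0]
      simp
    have hB : get_name_prefix_alt name = name := by
      simp [get_name_prefix_alt, hf]
    rw [hA, hB]
  · -- first '-' at position j
    have h0 : 0 ≤ PySem.Chars.find name.toList ['-'] := by
      have := PySem.Chars.neg_one_le_find name.toList ['-']
      omega
    set j : Nat := (PySem.Chars.find name.toList ['-']).toNat with hj
    have hjf : PySem.Chars.find name.toList ['-'] = (j : Int) := by omega
    have hspec := PySem.Chars.findFrom_natCast_spec name.toList ['-'] 0 (Nat.zero_le _)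
      (by rw [Nat.cast_zero, PySem.Chars.findFrom_zero]; exact hf)
    rw [Nat.cast_zero, PySem.Chars.findFrom_zero] at hspec
    obtain ⟨-, hpre, hmin⟩ := hspec
    have hmin' : ∀ i, i < j → ¬ ['-'] <+: name.toList.drop i := fun i hi =>
      hmin i (Nat.zero_le _) hi
    -- A's tests, rewritten through pv_key
    have hsw : ∀ P : String, '-' ∉ P.toList →
        (PySem.Str.startswith name (P ++ "-") = (name.toList.take j == P.toList)) := by
      intro P hP
      rw [PySem.Str.startswith_eq]
      have hiff := pv_key name.toList P.toList hP j hpre hmin'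
      have htl : (P ++ "-").toList = P.toList ++ ['-'] := by
        rw [String.toList_append, hdash]
      rcases Decidable.em (name.toList.take j = P.toList) with heq | hne
      · have hl : PySem.Chars.startswith name.toList ((P ++ "-").toList) = true :=
          (PySem.Chars.startswith_iff _ _).mpr (by rw [htl]; exact hiff.mpr heq)
        rw [hl, heq, beq_self_eq_true]
      · have hr : (name.toList.take j == P.toList) = false := beq_eq_false_iff_ne.mpr hne
        have hl : PySem.Chars.startswith name.toList ((P ++ "-").toList) = false := by
          cases hsw' : PySem.Chars.startswith name.toList ((P ++ "-").toList) with
          | false => rfl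
          | true =>
            exfalso
            have hpfx := (PySem.Chars.startswith_iff _ _).mp hsw'
            rw [htl] at hpfx
            exact hne (hiff.mp hpfx)
        rw [hl, hr]
    -- B's slice is the take
    have hslice : (PySem.Str.slice name none (some (PySem.Str.find name "-"))).toList
        = name.toList.take j := by
      rw [PySem.Str.toList_slice, PySem.Chars.slice_eq_listSlice, PySem.Str.find_eq, hdash, hjf,
        PySem.List.slice_to_natCast]
    have hiB : (PySem.Str.find name "-" != -1) = true := by
      rw [PySem.Str.find_eq, hdash, hjf]
      simp
    -- case on which prefix (if any) the text before the first '-' is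
    simp only [get_name_prefix, pvPrefixesA, pvLoopA,
      hsw "hotspot" (by decide), hsw "hotspot3D" (by decide), hsw "pathfinder" (by decide),
      hsw "srad_v2" (by decide), hsw "srad_v3" (by decide)]
    simp only [get_name_prefix_alt, pvPrefixSetB, hiB, Bool.true_and]
    set p : String := PySem.Str.slice name none (some (PySem.Str.find name "-")) with hp
    have hpt : p.toList = name.toList.take j := hslice
    by_cases h1 : name.toList.take j = "hotspot".toList
    · have : p = "hotspot" := String.toList_inj.mp (hpt.trans h1)
      simp [h1, this, PySem.Set.ofList, PySem.Set.add]
    · by_cases h2 : name.toList.take j = "hotspot3D".toList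
      · have : p = "hotspot3D" := String.toList_inj.mp (hpt.trans h2)
        simp [h1, h2, this, PySem.Set.ofList, PySem.Set.add]
      · by_cases h3 : name.toList.take j = "pathfinder".toList
        · have : p = "pathfinder" := String.toList_inj.mp (hpt.trans h3)
          simp [h1, h2, h3, this, PySem.Set.ofList, PySem.Set.add]
        · by_cases h4 : name.toList.take j = "srad_v2".toList
          · have : p = "srad_v2" := String.toList_inj.mp (hpt.trans h4)
            simp [h1, h2, h3, h4, this, PySem.Set.ofList, PySem.Set.add]
          · by_cases h5 : name.toList.take j = "srad_v3".toList
            · have : p = "srad_v3" := String.toList_inj.mp (hpt.trans h5)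
              simp [h1, h2, h3, h4, h5, this, PySem.Set.ofList, PySem.Set.add]
            · have hdis : ¬(p = "hotspot" ∨ p = "hotspot3D" ∨ p = "pathfinder" ∨
                  p = "srad_v2" ∨ p = "srad_v3") := by
                rintro (h|h|h|h|h) <;>
                  first
                    | exact h1 (hpt.symm.trans (congrArg String.toList h))
                    | exact h2 (hpt.symm.trans (congrArg String.toList h))
                    | exact h3 (hpt.symm.trans (congrArg String.toList h))
                    | exact h4 (hpt.symm.trans (congrArg String.toList h))
                    | exact h5 (hpt.symm.trans (congrArg String.toList h))
              have hcf : (PySem.Set.ofList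
                  ["hotspot", "hotspot3D", "pathfinder", "srad_v2", "srad_v3"]).contains p
                    ≠ true := by
                intro hc
                have hm : p ∈ ["hotspot", "hotspot3D", "pathfinder", "srad_v2", "srad_v3"] :=
                  (PySem.Set.mem_ofList _ _).mp (List.contains_iff_mem.mp hc)
                simp only [List.mem_cons, List.not_mem_nil, or_false] at hm
                exact hdis hm
              rw [if_neg hcf]
              split_ifs with a1 a2 a3 a4 a5 <;>
                first
                  | rfl
                  | exact absurd (eq_of_beq a1) h1
                  | exact absurd (eq_of_beq a2) h2
                  | exact absurd (eq_of_beq a3) h3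
                  | exact absurd (eq_of_beq a4) h4
                  | exact absurd (eq_of_beq a5) h5

-- ===== VERDICT (by name: the statement is the Claim_ definition above) =====
theorem get_name_prefix_spec : Claim_equal_get_name_prefix := by
  intro name _
  unfold Spec_get_name_prefix
  exact pv_main name
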